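-- pv_equiv track=rewrite | github.com/vaishnavi-devi7/PaperIQ | backend/app/main.py | find_vocab_suggestions
-- ===== SOURCE A (Python) =====
-- from typing import Dict, List, Tuple
--
-- SUGGESTIONS_MAP = {
--     "very": "considerably",
--     "really": "significantly",
--     "a lot": "substantially",
--     "lots of": "numerous",
--     "many": "numerous",
--     "a few": "several",
--     "good": "effective",
--     "bad": "adverse",
--     "big": "substantial",
--     "small": "minimal",
--     "important": "significant",
--     "different": "distinct",
--     "hard": "challenging",
--     "easy": "straightforward",
--     "new": "novel",
--     "fast": "rapid",
--     "show": "demonstrate",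
--     "use": "employ",
--     "get": "obtain",
--     "make": "construct",
--     "try": "attempt",
--     "help": "facilitate",
--     "need": "require",
--     "change": "modify",
--     "look at": "examine",
--     "find out": "ascertain",
--     "carry out": "conduct",
--     "deal with": "address",
--     "set up": "establish",
--     "shows that": "indicates that",
--     "in order to": "to",
--     "due to the fact that": "because",
--     "in spite of": "despite",
--     "at this point in time": "currently",
--     "a number of": "several",
-- }
--
-- def find_vocab_suggestions(text: str, sections_raw: Dict[str, str]) -> List[Dict[str, str]]:
--     findings = []
--     text_lower = text.lower()
--
--     for weak, better in SUGGESTIONS_MAP.items():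
--         if weak in text_lower:
--             found_in = []
--             for sec_name, sec_text in sections_raw.items():
--                 if weak in sec_text.lower():
--                     found_in.append(sec_name)
--
--             findings.append({
--                 "weak": weak,
--                 "better": better,
--                 "location": ", ".join(found_in) if found_in else "Document"
--             })
--
--     unique = []
--     seen = set()
--     for item in findings:
--         key = (item["weak"], item["better"], item["location"])
--         if key not in seen:
--             seen.add(key)
--             unique.append(item)
--
--     return unique[:20]
-- ===== SOURCE B (Python) =====
-- from typing import Dict, List
--
-- SUGGESTIONS_MAP = {
--     "very": "considerably",
--     "really": "significantly",
--     "a lot": "substantially",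
--     "lots of": "numerous",
--     "many": "numerous",
--     "a few": "several",
--     "good": "effective",
--     "bad": "adverse",
--     "big": "substantial",
--     "small": "minimal",
--     "important": "significant",
--     "different": "distinct",
--     "hard": "challenging",
--     "easy": "straightforward",
--     "new": "novel",
--     "fast": "rapid",
--     "show": "demonstrate",
--     "use": "employ",
--     "get": "obtain",
--     "make": "construct",
--     "try": "attempt",
--     "help": "facilitate",
--     "need": "require",
--     "change": "modify",
--     "look at": "examine",
--     "find out": "ascertain",
--     "carry out": "conduct",
--     "deal with": "address",
--     "set up": "establish",
--     "shows that": "indicates that",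
--     "in order to": "to",
--     "due to the fact that": "because",
--     "in spite of": "despite",
--     "at this point in time": "currently",
--     "a number of": "several",
-- }
--
-- def find_vocab_suggestions(text: str, sections_raw: Dict[str, str]) -> List[Dict[str, str]]:
--     # One pass over the sections: lowercase each section text exactly once and
--     # collect (weak phrase, section name) hits, then group them into an index.
--     pairs = []
--     for sec_name, sec_text in sections_raw.items():
--         low = sec_text.lower()
--         pairs.extend((w, sec_name) for w in SUGGESTIONS_MAP if w in low)
--     index = {}
--     for w, sec_name in pairs:
--         index.setdefault(w, []).append(sec_name)
--     # Emit findings in the map's fixed order; keys are unique, so no dedup pass.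
--     text_lower = text.lower()
--     out = []
--     for weak, better in SUGGESTIONS_MAP.items():
--         if weak in text_lower:
--             locs = index.get(weak, [])
--             out.append({"weak": weak, "better": better,
--                         "location": ", ".join(locs) if locs else "Document"})
--     return out[:20]
-- ===== Notes on version B (the rewrite author's own statement) =====
-- stated objective: alternative
-- what changed: B inverts the nested scan: one pass over the sections lowercases each section text once and builds a phrase-to-section-names index (grouped from (phrase, name) hit pairs), then emits findings straight from SUGGESTIONS_MAP order via index lookup, dropping A's per-phrase rescan of all sections and its redundant dedup pass (map keys are unique).
import Mathlib
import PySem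

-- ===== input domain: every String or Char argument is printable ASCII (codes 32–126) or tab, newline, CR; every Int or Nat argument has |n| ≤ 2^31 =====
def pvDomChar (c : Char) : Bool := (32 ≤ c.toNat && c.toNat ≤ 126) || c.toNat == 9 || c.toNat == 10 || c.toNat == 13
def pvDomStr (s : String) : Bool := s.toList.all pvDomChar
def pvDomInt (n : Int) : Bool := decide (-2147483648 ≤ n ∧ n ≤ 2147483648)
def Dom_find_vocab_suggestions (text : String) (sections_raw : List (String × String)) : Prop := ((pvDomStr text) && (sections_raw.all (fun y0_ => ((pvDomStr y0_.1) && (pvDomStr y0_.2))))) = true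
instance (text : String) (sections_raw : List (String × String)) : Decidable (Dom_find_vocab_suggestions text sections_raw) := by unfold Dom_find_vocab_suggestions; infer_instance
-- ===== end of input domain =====

-- B inverts the scan: one pass over the sections builds a phrase→section-names index
-- (each section lowercased once) and drops A's redundant dedup pass (map keys are unique). Alternative decomposition.


def SUGGESTIONS_MAP : List (String × String) := [
  ("very", "considerably"), ("really", "significantly"), ("a lot", "substantially"),
  ("lots of", "numerous"), ("many", "numerous"), ("a few", "several"),
  ("good", "effective"), ("bad", "adverse"), ("big", "substantial"),
  ("small", "minimal"), ("important", "significant"), ("different", "distinct"),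
  ("hard", "challenging"), ("easy", "straightforward"), ("new", "novel"),
  ("fast", "rapid"), ("show", "demonstrate"), ("use", "employ"),
  ("get", "obtain"), ("make", "construct"), ("try", "attempt"),
  ("help", "facilitate"), ("need", "require"), ("change", "modify"),
  ("look at", "examine"), ("find out", "ascertain"), ("carry out", "conduct"),
  ("deal with", "address"), ("set up", "establish"), ("shows that", "indicates that"),
  ("in order to", "to"), ("due to the fact that", "because"), ("in spite of", "despite"),
  ("at this point in time", "currently"), ("a number of", "several")]

-- ===== PORT A =====
-- item["k"] on the just-built three-entry dict is ported as first-match lookup on the assoc list (exact: keys present, unique).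
def pvKeyOf (item : List (String × String)) : String × String × String :=
  ((PySem.Dict.mk item).getD "weak" "", (PySem.Dict.mk item).getD "better" "",
   (PySem.Dict.mk item).getD "location" "")

def find_vocab_suggestions (text : String) (sections_raw : List (String × String)) : List (List (String × String)) :=
  let text_lower := PySem.Str.lower text
  let findings : List (List (String × String)) :=
    SUGGESTIONS_MAP.foldl (fun findings wb =>
      if PySem.Str.isIn wb.1 text_lower then
        let found_in : List String :=
          sections_raw.foldl (fun acc s =>
            if PySem.Str.isIn wb.1 (PySem.Str.lower s.2) then acc ++ [s.1] else acc) []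
        findings ++ [[("weak", wb.1), ("better", wb.2),
          ("location", if found_in.isEmpty then "Document" else PySem.Str.join ", " found_in)]]
      else findings) []
  let uniqueSeen :=
    findings.foldl (fun (p : List (List (String × String)) × PySem.Set (String × String × String)) item =>
      if PySem.Set.contains p.2 (pvKeyOf item) then p
      else (p.1 ++ [item], PySem.Set.add p.2 (pvKeyOf item))) ([], PySem.Set.empty)
  uniqueSeen.1.take 20

-- ===== PORT B =====
def find_vocab_suggestions_alt (text : String) (sections_raw : List (String × String)) : List (List (String × String)) :=
  let pairs : List (String × String) :=
    sections_raw.foldl (fun acc s =>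
      acc ++ ((SUGGESTIONS_MAP.map (·.1)).filter
                (fun w => PySem.Str.isIn w (PySem.Str.lower s.2))).map (fun w => (w, s.1))) []
  let index : PySem.Dict String (List String) :=
    pairs.foldl (fun d p => d.modify p.1 [] (· ++ [p.2])) PySem.Dict.empty
  let text_lower := PySem.Str.lower text
  let out : List (List (String × String)) :=
    SUGGESTIONS_MAP.foldl (fun out wb =>
      if PySem.Str.isIn wb.1 text_lower then
        let locs := index.getD wb.1 []
        out ++ [[("weak", wb.1), ("better", wb.2),
          ("location", if locs.isEmpty then "Document" else PySem.Str.join ", " locs)]]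
      else out) []
  out.take 20

-- ===== PRECONDITION & SPEC =====
def Spec_find_vocab_suggestions (text : String) (sections_raw : List (String × String)) (out : List (List (String × String))) : Prop := out = find_vocab_suggestions_alt text sections_raw
instance (text : String) (sections_raw : List (String × String)) (out : List (List (String × String))) : Decidable (Spec_find_vocab_suggestions text sections_raw out) := by unfold Spec_find_vocab_suggestions; infer_instance

-- ===== CLAIM (what is proved, stated in full; the proofs are below) =====
def Claim_equal_find_vocab_suggestions : Prop := ∀ (text : String) (sections_raw : List (String × String)), Dom_find_vocab_suggestions text sections_raw → Spec_find_vocab_suggestions text sections_raw (find_vocab_suggestions text sections_raw)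


-- ===== LEMMAS AND PROOFS =====

theorem flatMap_if {α β : Type} (p : α → Bool) (f : α → β) (l : List α) :
    l.flatMap (fun s => if p s then [f s] else []) = (l.filter p).map f := by
  induction l with
  | nil => rfl
  | cons h t ih => by_cases hp : p h <;> simp [List.flatMap_cons, hp, ih]

-- filtering one section's hit list down to one key keeps at most its own name
theorem chunk_filter (w : String) (nm : String) (q : String → Bool)
    (hw : w ∈ SUGGESTIONS_MAP.map (·.1)) :
    ((((SUGGESTIONS_MAP.map (·.1)).filter q).map (fun w' => (w', nm))).filter
        (fun p => p.1 == w)).map (fun x => x.2)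
    = if q w then [nm] else [] := by
  rw [List.filter_map]
  have h1 : List.filter ((fun p => p.1 == w) ∘ (fun w' => (w', nm)))
        ((SUGGESTIONS_MAP.map (·.1)).filter q)
      = List.filter q ((SUGGESTIONS_MAP.map (·.1)).filter (fun w' => w' == w)) := by
    simp only [Function.comp_def, List.filter_filter]
    congr 1; funext a; exact Bool.and_comm ..
  rw [h1, List.filter_beq w,
      List.count_eq_one_of_mem (by decide : (SUGGESTIONS_MAP.map (·.1)).Nodup) hw]
  by_cases hq : q w <;> simp [hq, List.replicate]

-- B's index at a map key w holds exactly the names of the sections whose lowered text contains w.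
theorem index_getD (sections_raw : List (String × String)) (w : String)
    (hw : w ∈ SUGGESTIONS_MAP.map (·.1)) :
    ((sections_raw.foldl (fun acc s =>
        acc ++ ((SUGGESTIONS_MAP.map (·.1)).filter
                  (fun w => PySem.Str.isIn w (PySem.Str.lower s.2))).map (fun w => (w, s.1))) []
      ).foldl (fun d p => d.modify p.1 [] (· ++ [p.2])) PySem.Dict.empty).getD w []
    = (sections_raw.filter (fun s => PySem.Str.isIn w (PySem.Str.lower s.2))).map (·.1) := by
  rw [PySem.List.foldl_append_eq_flatMap, PySem.Dict.getD_foldl_modify_append]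
  simp only [List.nil_append, PySem.Dict.getD_empty, List.filter_flatMap, List.map_flatMap]
  rw [← flatMap_if (fun s => PySem.Str.isIn w (PySem.Str.lower s.2)) (fun s => s.1) sections_raw]
  congr 1
  funext s
  simpa using chunk_filter w s.1 (fun w' => PySem.Str.isIn w' (PySem.Str.lower s.2)) hw

theorem pvKeyOf_item (a b c : String) :
    pvKeyOf [("weak", a), ("better", b), ("location", c)] = (a, b, c) := by
  simp [pvKeyOf, PySem.Dict.getD_eq_get?_getD, PySem.Dict.get?_mk_cons]

-- A's dedup fold is the identity when the computed keys are pairwise distinct.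
theorem dedup_noop : ∀ (l : List (List (String × String)))
    (_ : (l.map pvKeyOf).Nodup)
    (acc : List (List (String × String))) (seen : PySem.Set (String × String × String)),
      (∀ x ∈ l, pvKeyOf x ∉ seen) →
      (l.foldl (fun (p : List (List (String × String)) × PySem.Set (String × String × String)) item =>
          if PySem.Set.contains p.2 (pvKeyOf item) then p
          else (p.1 ++ [item], PySem.Set.add p.2 (pvKeyOf item))) (acc, seen)).1 = acc ++ l := by
  intro l
  induction l with
  | nil => intro _ acc seen _; simp
  | cons h t ih =>
    intro hnd acc seen hs
    simp only [List.foldl_cons]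
    have hc : PySem.Set.contains seen (pvKeyOf h) = false := by
      rw [← Bool.not_eq_true, PySem.Set.contains_iff]
      exact hs h (List.mem_cons_self ..)
    rw [hc]
    simp only [Bool.false_eq_true, if_false]
    rw [ih (by simpa using hnd.of_cons) (acc ++ [h]) _ ?_]
    · simp
    · intro x hx
      rw [PySem.Set.mem_add]
      rintro (hmem | heq)
      · exact hs x (List.mem_cons_of_mem _ hx) hmem
      · simp only [List.map_cons, List.nodup_cons] at hnd
        exact hnd.1 (heq ▸ List.mem_map_of_mem hx)

-- ===== VERDICT (by name: the statement is the Claim_ definition above) =====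
theorem find_vocab_suggestions_spec : Claim_equal_find_vocab_suggestions := by
  intro text sections_raw _
  unfold Spec_find_vocab_suggestions find_vocab_suggestions find_vocab_suggestions_alt
  simp only [PySem.List.foldl_append_if, List.nil_append]
  set gate := fun wb : String × String => PySem.Str.isIn wb.1 (PySem.Str.lower text) with hgate
  set fA := fun wb : String × String =>
    [("weak", wb.1), ("better", wb.2),
     ("location",
       if (((sections_raw.filter (fun s => PySem.Str.isIn wb.1 (PySem.Str.lower s.2))).map
             fun s => s.1)).isEmpty then "Document"
       else PySem.Str.join ", " ((sections_raw.filter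
             (fun s => PySem.Str.isIn wb.1 (PySem.Str.lower s.2))).map fun s => s.1))] with hfA
  have hkeys : ((SUGGESTIONS_MAP.filter gate).map (fun wb => wb.1)).Nodup :=
    ((List.filter_sublist (l := SUGGESTIONS_MAP) (p := gate)).map _).nodup
      (by decide : (SUGGESTIONS_MAP.map (fun wb => wb.1)).Nodup)
  have hfst : (SUGGESTIONS_MAP.filter gate).map (Prod.fst ∘ (pvKeyOf ∘ fA))
      = (SUGGESTIONS_MAP.filter gate).map (fun wb => wb.1) := by
    apply List.map_congr_left
    intro wb _
    simp [hfA, pvKeyOf_item]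
  have hnd : (((SUGGESTIONS_MAP.filter gate).map fA).map pvKeyOf).Nodup := by
    rw [List.map_map]
    apply List.Nodup.of_map Prod.fst
    rw [List.map_map, hfst]
    exact hkeys
  rw [dedup_noop _ hnd [] PySem.Set.empty
        (fun x _ hmem => by simp [PySem.Set.empty] at hmem), List.nil_append]
  congr 1
  apply List.map_congr_left
  intro wb hwb
  have hw : wb.1 ∈ SUGGESTIONS_MAP.map (·.1) :=
    List.mem_map_of_mem (List.mem_of_mem_filter hwb)
  rw [hfA]
  rw [index_getD sections_raw wb.1 hw]
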